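-- pv_equiv track=rewrite | github.com/ramizik/stealthD | analytics/improved_player_ball_assigner.py | count_player_touches
-- ===== SOURCE A (Python) =====
-- from typing import Dict, Optional, Tuple, List
--
-- def count_player_touches(ball_assignments: Dict[int, int]) -> Dict[int, int]:
--     """
--     Count touches from frame-by-frame assignments.
--
--     A touch is counted when ball is assigned to a new player.
--     """
--     touches = {}
--     prev_player = None
--
--     sorted_frames = sorted(ball_assignments.keys())
--
--     for frame_idx in sorted_frames:
--         current_player = ball_assignments[frame_idx]
--
--         if current_player != prev_player and current_player is not None:
--             if current_player not in touches:
--                 touches[current_player] = 0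
--             touches[current_player] += 1
--
--         prev_player = current_player
--
--     return touches
-- ===== SOURCE B (Python) =====
-- def _num_runs(values, p):
--     """Number of maximal consecutive runs of p in values (one scan with an 'inside a run' flag)."""
--     n = 0
--     inside = False
--     for v in values:
--         if v == p and not inside:
--             n += 1
--         inside = (v == p)
--     return n
--
-- def count_player_touches(ball_assignments):
--     """Count touches: for each player (in first-appearance order over sorted frames),
--     count the maximal consecutive runs of that player in the value sequence."""
--     values = [ball_assignments[f] for f in sorted(ball_assignments)]
--     return {p: _num_runs(values, p) for p in dict.fromkeys(values)}
-- ===== Notes on version B (the rewrite author's own statement) =====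
-- stated objective: alternative
-- what changed: A makes one stateful pass carrying (touches dict, prev_player) and incrementing on change; B first builds the distinct-player list (ordered dedup of the sorted-frame value sequence) and then, per player, counts that player's maximal consecutive runs with an independent boolean-flag scan, assembling the result as a dict comprehension: nested per-key scans instead of a single accumulator pass.
import Mathlib
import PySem

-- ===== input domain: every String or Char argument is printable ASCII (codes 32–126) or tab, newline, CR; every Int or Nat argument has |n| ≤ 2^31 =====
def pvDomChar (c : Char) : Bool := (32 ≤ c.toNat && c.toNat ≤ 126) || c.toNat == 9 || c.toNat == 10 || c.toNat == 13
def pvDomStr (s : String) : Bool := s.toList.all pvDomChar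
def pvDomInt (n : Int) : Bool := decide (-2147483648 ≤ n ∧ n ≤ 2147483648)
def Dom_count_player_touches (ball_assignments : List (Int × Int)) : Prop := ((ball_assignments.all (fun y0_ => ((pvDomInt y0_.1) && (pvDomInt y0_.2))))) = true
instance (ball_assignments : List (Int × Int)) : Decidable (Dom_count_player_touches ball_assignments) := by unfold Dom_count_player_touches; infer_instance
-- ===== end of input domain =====

-- B replaces A's single stateful (touches, prev_player) pass by nested per-player scans:
-- ordered dedup of the sorted-frame value sequence, then one run-counting scan per player (alternative decomposition; same result).

-- ===== PORT A =====
-- one loop step of A: state = (touches, prev_player); `current_player is not None` is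
-- identically true (dict values are ints), so the test reduces to `current != prev`.
def cptStepA (d : PySem.Dict Int Int) (st : PySem.Dict Int Int × Option Int) (frame_idx : Int) :
    PySem.Dict Int Int × Option Int :=
  let current : Int := d.getD frame_idx 0   -- frame_idx comes from d.keys, so the KeyError default is never used
  let touches :=
    if some current ≠ st.2 then
      let t := if st.1.contains current then st.1 else st.1.insert current 0
      t.modify current 0 (· + 1)
    else st.1
  (touches, some current)

def count_player_touches (ball_assignments : List (Int × Int)) : List (Int × Int) :=
  let d := PySem.Dict.ofList ball_assignments
  let sorted_frames := PySem.List.sorted d.keys (fun x => x) false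
  (sorted_frames.foldl (cptStepA d) (PySem.Dict.empty, none)).1.items

-- ===== PORT B =====
-- _num_runs: one scan with an 'inside a run of p' boolean flag
def cptNumRuns (values : List Int) (p : Int) : Int :=
  (values.foldl (fun st v => ((if v == p && !st.2 then st.1 + 1 else st.1), v == p))
    ((0 : Int), false)).1

def count_player_touches_alt (ball_assignments : List (Int × Int)) : List (Int × Int) :=
  let d := PySem.Dict.ofList ball_assignments
  let values := (PySem.List.sorted d.keys (fun x => x) false).map (fun f => d.getD f 0)
  -- {p: _num_runs(values, p) for p in dict.fromkeys(values)}
  ((PySem.List.dedup values).foldl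
      (fun t p => t.insert p (cptNumRuns values p)) PySem.Dict.empty).items

-- ===== PRECONDITION & SPEC =====
def Spec_count_player_touches (ball_assignments : List (Int × Int)) (out : List (Int × Int)) : Prop := out = count_player_touches_alt ball_assignments
instance (ball_assignments : List (Int × Int)) (out : List (Int × Int)) : Decidable (Spec_count_player_touches ball_assignments out) := by unfold Spec_count_player_touches; infer_instance

-- ===== CLAIM (what is proved, stated in full; the proofs are below) =====
def Claim_equal_count_player_touches : Prop := ∀ (ball_assignments : List (Int × Int)), Dom_count_player_touches ball_assignments → Spec_count_player_touches ball_assignments (count_player_touches ball_assignments)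

-- ===== LEMMAS AND PROOFS =====

-- the run heads of `vals` given that the element just before was `prev`
def cptHeads (prev : Option Int) (vals : List Int) : List Int :=
  match vals with
  | [] => []
  | c :: rest => (if prev ≠ some c then [c] else []) ++ cptHeads (some c) rest

-- A's increment equals counting-into-a-dict
lemma cptInc_eq (t : PySem.Dict Int Int) (c : Int) :
    (if t.contains c then t else t.insert c 0).modify c 0 (· + 1)
      = t.insert c (t.getD c 0 + 1) := by
  by_cases h : t.contains c = true
  · simp [h, PySem.Dict.modify]
  · have h' : t.contains c = false := eq_false_of_ne_true h
    rw [PySem.Dict.getD_of_not_contains (h := h')]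
    simp [h', PySem.Dict.modify, PySem.Dict.getD_insert_self,
      PySem.Dict.insert_insert_self]

-- A's loop counts exactly the run heads
lemma cptMain (d : PySem.Dict Int Int) (frames : List Int) (prev : Option Int)
    (t : PySem.Dict Int Int) :
    (frames.foldl (cptStepA d) (t, prev)).1
      = (cptHeads prev (frames.map (fun f => d.getD f 0))).foldl
          (fun t p => t.insert p (t.getD p 0 + 1)) t := by
  induction frames generalizing prev t with
  | nil => simp [cptHeads]
  | cons f rest ih =>
      simp only [List.foldl_cons, List.map_cons, cptHeads]
      rw [ih]
      by_cases h : prev = some (d.getD f 0)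
      · simp [cptStepA, h]
      · simp [cptStepA, Ne.symm h, h, cptInc_eq]

-- run heads have the same distinct elements, in the same first-seen order, as the values
lemma cptHeads_foldl_add (vals : List Int) (prev : Option Int) (S : PySem.Set Int)
    (hprev : ∀ q, prev = some q → q ∈ S) :
    (cptHeads prev vals).foldl PySem.Set.add S = vals.foldl PySem.Set.add S := by
  induction vals generalizing prev S with
  | nil => simp [cptHeads]
  | cons c rest ih =>
      simp only [cptHeads, List.foldl_cons]
      by_cases h : prev = some c
      · have hc : c ∈ S := hprev c h
        have : PySem.Set.add S c = S := PySem.Set.add_of_mem hc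
        simp only [h, ne_eq, not_true_eq_false, reduceIte,
          List.nil_append, this]
        exact ih (some c) S (by intro q hq; cases hq; exact hc)
      · simp only [h, ne_eq, not_false_eq_true, if_pos, List.cons_append, List.nil_append,
          List.foldl_cons]
        exact ih (some c) (PySem.Set.add S c)
          (by intro q hq; cases hq; exact (PySem.Set.mem_add _ _ _).2 (Or.inr rfl))

lemma cptOfList_heads (vals : List Int) :
    PySem.Set.ofList (cptHeads none vals) = PySem.Set.ofList vals := by
  rw [PySem.Set.ofList_eq_foldl, PySem.Set.ofList_eq_foldl]
  exact cptHeads_foldl_add vals none [] (by intro q hq; cases hq)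

-- B's flag scan counts the run heads of p
lemma cptNumRuns_spec (p : Int) (vals : List Int) (prev : Option Int) (n : Int) :
    (vals.foldl (fun st v => ((if v == p && !st.2 then st.1 + 1 else st.1), v == p))
        (n, prev == some p)).1
      = n + ((cptHeads prev vals).count p : Int) := by
  induction vals generalizing prev n with
  | nil => simp [cptHeads]
  | cons c rest ih =>
      simp only [List.foldl_cons, cptHeads]
      have hcc : (c == p) = (some c == some p) := rfl
      rw [hcc, ih (some c)]
      by_cases hc : c = p
      · subst hc
        by_cases hp : prev = some c
        · simp [hp]
        · simp [hp]
          ring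
      · have h1 : (some c == some p) = false := by
          simp [hc]
        rw [h1]
        by_cases hp : prev = some c
        · simp [hp]
        · simp only [hp, ne_eq, not_false_eq_true, if_pos, List.cons_append,
            List.nil_append, List.count_cons]
          simp [hc]

-- ===== VERDICT (by name: the statement is the Claim_ definition above) =====
theorem count_player_touches_spec : Claim_equal_count_player_touches := by
  intro ba _
  unfold Spec_count_player_touches count_player_touches count_player_touches_alt
  simp only []
  rw [cptMain, PySem.Dict.foldl_insert_getD_add_one_eq_counter, PySem.Dict.items_counter]
  rw [PySem.Dict.items_foldl_insert_fresh _ (fun a => a) _ _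
        (by intro a _; exact PySem.Dict.contains_empty a)
        (by simp [PySem.Set.nodup_ofList])]
  have hded : PySem.List.dedup ((PySem.List.sorted (PySem.Dict.ofList ba).keys (fun x => x) false).map
      (fun f => (PySem.Dict.ofList ba).getD f 0))
      = PySem.Set.ofList ((PySem.List.sorted (PySem.Dict.ofList ba).keys (fun x => x) false).map
      (fun f => (PySem.Dict.ofList ba).getD f 0)) := rfl
  rw [hded, cptOfList_heads]
  have hNR : ∀ (vs : List Int) (p : Int), cptNumRuns vs p = ((cptHeads none vs).count p : Int) := by
    intro vs p
    have h := cptNumRuns_spec p vs none 0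
    simp only [show ((none : Option Int) == some p) = false from rfl] at h
    unfold cptNumRuns
    rw [h]
    ring
  have hfun : ∀ (vs : List Int), (fun k => ((k, (((cptHeads none vs).count k : Nat) : Int)) : Int × Int))
      = fun p => (p, cptNumRuns vs p) := by
    intro vs
    funext p
    rw [hNR]
  rw [hfun]
  rfl
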